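-- pv_equiv track=rewrite | github.com/gardonig/semester_project_2026 | src/anatomy_poset/gui/query_dialog.py | _add_break_hints
-- ===== SOURCE A (Python) =====
-- def _add_break_hints(text: str) -> str:
--     """Insert U+200B after the last underscore in each underscore-containing token."""
--     out = []
--     for token in text.split(" "):
--         idx = token.rfind("_")
--         if idx != -1 and idx < len(token) - 1:
--             token = token[: idx + 1] + "\u200b" + token[idx + 1 :]
--         out.append(token)
--     return " ".join(out)
-- ===== SOURCE B (Python) =====
-- def _add_break_hints(text: str) -> str:
--     """Insert U+200B after the last underscore in each underscore-containing token."""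
--     out = []
--     nonempty = False   # current token (scanned right-to-left) has chars after this point
--     seen = False       # already passed the token's last underscore
--     for ch in reversed(text):
--         if ch == " ":
--             nonempty = False
--             seen = False
--             out.append(ch)
--         elif ch == "_":
--             if not seen and nonempty:
--                 out.append("\u200b")
--             out.append(ch)
--             seen = True
--         else:
--             nonempty = True
--             out.append(ch)
--     return "".join(reversed(out))
-- ===== Notes on version B (the rewrite author's own statement) =====
-- stated objective: alternative
-- what changed: Replaces A's split-on-space / rfind / slice-reassemble / join pipeline by a single right-to-left character scan that carries two per-token flags (token-nonempty-so-far, last-underscore-already-passed) and emits the zero-width space on the fly.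
import Mathlib
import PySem

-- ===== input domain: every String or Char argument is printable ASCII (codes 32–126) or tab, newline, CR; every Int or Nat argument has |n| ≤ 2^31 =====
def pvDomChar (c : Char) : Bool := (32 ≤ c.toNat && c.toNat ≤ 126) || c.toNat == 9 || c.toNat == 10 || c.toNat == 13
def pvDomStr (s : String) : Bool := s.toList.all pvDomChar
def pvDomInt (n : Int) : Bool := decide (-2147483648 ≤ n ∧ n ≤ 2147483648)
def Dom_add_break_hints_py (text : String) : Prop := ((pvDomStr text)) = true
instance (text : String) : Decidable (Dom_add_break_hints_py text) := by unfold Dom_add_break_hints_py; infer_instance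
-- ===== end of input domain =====

-- B replaces A's split/rfind/slice/join pipeline by one right-to-left character pass with two flags (alternative decomposition, same cost).

-- ===== PORT A =====
-- loop body of A: idx = token.rfind("_"); if idx != -1 and idx < len(token)-1: insert U+200B after idx
def pvATok (token : List Char) : List Char :=
  let idx := PySem.Chars.rfind token ['_']
  if idx ≠ -1 ∧ idx < (token.length : Int) - 1 then
    PySem.Chars.slice token none (some (idx + 1)) ++ ['\u200B'] ++ PySem.Chars.slice token (some (idx + 1)) none
  else token

def add_break_hints_py (text : String) : String :=
  String.mk (PySem.Chars.join [' ']
    (List.foldl (fun out token => out ++ [pvATok token]) [] (PySem.Chars.splitOn text.toList [' '])))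

-- ===== PORT B =====
-- one step of B's reverse scan; state = (out, nonempty, seen)
def pvBStep (st : List Char × Bool × Bool) (ch : Char) : List Char × Bool × Bool :=
  if ch = ' ' then (st.1 ++ [ch], false, false)
  else if ch = '_' then
    ((if st.2.2 = false ∧ st.2.1 = true then st.1 ++ ['\u200B', ch] else st.1 ++ [ch]), st.2.1, true)
  else (st.1 ++ [ch], true, st.2.2)

def add_break_hints_py_alt (text : String) : String :=
  String.mk ((List.foldl pvBStep ([], false, false) text.toList.reverse).1.reverse)

-- ===== PRECONDITION & SPEC =====
def Spec_add_break_hints_py (text : String) (out : String) : Prop := out = add_break_hints_py_alt text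
instance (text : String) (out : String) : Decidable (Spec_add_break_hints_py text out) := by unfold Spec_add_break_hints_py; infer_instance

-- ===== CLAIM (what is proved, stated in full; the proofs are below) =====
def Claim_equal_add_break_hints_py : Prop := ∀ (text : String), Dom_add_break_hints_py text → Spec_add_break_hints_py text (add_break_hints_py text)

-- ===== LEMMAS AND PROOFS =====

-- mode of B's scan: p = token start (nonempty=false, seen=false), q = nonempty, seen=false, c = seen (copy)
inductive PvMode | p | q | c
deriving DecidableEq

def pvRun : PvMode → List Char → List Char
  | _, [] => []
  | m, ch :: cs =>
    if ch = ' ' then ' ' :: pvRun .p cs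
    else match m with
      | .p => if ch = '_' then ch :: pvRun .c cs else ch :: pvRun .q cs
      | .q => if ch = '_' then '\u200B' :: ch :: pvRun .c cs else ch :: pvRun .q cs
      | .c => ch :: pvRun .c cs

def pvMode (ne seen : Bool) : PvMode := if seen then .c else if ne then .q else .p

def pvSplit : List Char → List (List Char)
  | [] => [[]]
  | c :: r => if c = ' ' then [] :: pvSplit r
              else match pvSplit r with
                | [] => [[c]]
                | h :: t => (c :: h) :: t

def pvConsHd (x : List Char) : List (List Char) → List (List Char)
  | [] => [x]
  | h :: t => (x ++ h) :: t

theorem pvSplit_ne_nil (s : List Char) : pvSplit s ≠ [] := by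
  cases s with
  | nil => simp [pvSplit]
  | cons c r =>
    simp only [pvSplit]
    split_ifs
    · simp
    · cases h : pvSplit r <;> simp

theorem pvSplit_no_space (s : List Char) : ∀ t ∈ pvSplit s, ' ' ∉ t := by
  induction s with
  | nil => intro t ht; simp [pvSplit] at ht; simp [ht]
  | cons c r ih =>
    intro t ht
    by_cases hc : c = ' '
    · simp [pvSplit, hc] at ht
      rcases ht with h | h
      · simp [h]
      · exact ih t h
    · simp only [pvSplit, if_neg hc] at ht
      cases h : pvSplit r with
      | nil => exact absurd h (pvSplit_ne_nil r)
      | cons hd tl =>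
        rw [h] at ht
        rcases List.mem_cons.mp ht with h1 | h1
        · subst h1
          intro hmem
          rcases List.mem_cons.mp hmem with h2 | h2
          · exact hc h2.symm
          · exact ih hd (by rw [h]; exact List.mem_cons_self) h2
        · exact ih t (by rw [h]; exact List.mem_cons_of_mem _ h1)

theorem pv_go_eq (fuel : Nat) : ∀ (l cur : List Char) (acc : List (List Char)), l.length ≤ fuel →
    PySem.Chars.splitOn.go [' '] fuel l cur acc = acc.reverse ++ pvConsHd cur.reverse (pvSplit l) := by
  induction fuel with
  | zero =>
    intro l cur acc hl
    have : l = [] := List.eq_nil_of_length_eq_zero (Nat.le_zero.mp hl)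
    subst this
    simp [PySem.Chars.splitOn.go, pvSplit, pvConsHd]
  | succ fuel ih =>
    intro l cur acc hl
    cases l with
    | nil => simp [PySem.Chars.splitOn.go, pvSplit, pvConsHd]
    | cons c rest =>
      rw [PySem.Chars.splitOn.go]
      by_cases hc : c = ' '
      · subst hc
        have hpre : List.isPrefixOf [' '] (' ' :: rest) = true := by simp [List.isPrefixOf]
        rw [if_pos hpre]
        simp only [List.length_singleton, List.drop_succ_cons, List.drop_zero]
        rw [ih rest [] _ (by simpa using Nat.le_of_succ_le_succ hl)]
        obtain ⟨h, t, hht⟩ : ∃ h t, pvSplit rest = h :: t := by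
          cases hh : pvSplit rest with
          | nil => exact absurd hh (pvSplit_ne_nil rest)
          | cons a b => exact ⟨a, b, rfl⟩
        simp [pvSplit, hht, pvConsHd]
      · have hpre : List.isPrefixOf [' '] (c :: rest) = false := by
          simp [List.isPrefixOf]
          exact fun h => hc h.symm
        rw [if_neg (by simp [hpre])]
        rw [ih rest (c :: cur) acc (by simpa using Nat.le_of_succ_le_succ hl)]
        obtain ⟨h, t, hht⟩ : ∃ h t, pvSplit rest = h :: t := by
          cases hh : pvSplit rest with
          | nil => exact absurd hh (pvSplit_ne_nil rest)
          | cons a b => exact ⟨a, b, rfl⟩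
        simp [pvSplit, hc, hht, pvConsHd]

theorem pv_splitOn_eq (s : List Char) : PySem.Chars.splitOn s [' '] = pvSplit s := by
  rw [PySem.Chars.splitOn, pv_go_eq (s.length + 1) s [] [] (Nat.le_succ _)]
  obtain ⟨h, t, hht⟩ : ∃ h t, pvSplit s = h :: t := by
    cases hh : pvSplit s with
    | nil => exact absurd hh (pvSplit_ne_nil s)
    | cons a b => exact ⟨a, b, rfl⟩
  simp [hht, pvConsHd]

theorem pv_join_split (s : List Char) : PySem.Chars.join [' '] (pvSplit s) = s := by
  induction s with
  | nil => simp [pvSplit, PySem.Chars.join, List.intercalate]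
  | cons c r ih =>
    by_cases hc : c = ' '
    · subst hc
      obtain ⟨h, t, hht⟩ : ∃ h t, pvSplit r = h :: t := by
        cases hh : pvSplit r with
        | nil => exact absurd hh (pvSplit_ne_nil r)
        | cons a b => exact ⟨a, b, rfl⟩
      rw [hht] at ih
      simp [pvSplit, hht, PySem.Chars.join, List.intercalate] at ih ⊢
      simpa using ih
    · obtain ⟨h, t, hht⟩ : ∃ h t, pvSplit r = h :: t := by
        cases hh : pvSplit r with
        | nil => exact absurd hh (pvSplit_ne_nil r)
        | cons a b => exact ⟨a, b, rfl⟩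
      rw [hht] at ih
      simp only [pvSplit, if_neg hc, hht]
      cases t with
      | nil => simp [PySem.Chars.join, List.intercalate, List.intersperse] at ih ⊢; simp [ih]
      | cons x xs =>
        simp [PySem.Chars.join, List.intercalate, List.intersperse] at ih ⊢
        simp [ih]

-- rfind on ['_']
theorem pv_rfind_go_none (s : List Char) (hs : '_' ∉ s) : ∀ j, PySem.Chars.rfind.go s ['_'] j = -1 := by
  intro j
  induction j with
  | zero =>
    rw [PySem.Chars.rfind.go]
    rw [if_neg]
    intro hpre
    exact hs ((List.isPrefixOf_iff_prefix.mp hpre).subset (by simp))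
  | succ j ih =>
    rw [PySem.Chars.rfind.go]
    rw [if_neg, ih]
    intro hpre
    have h1 : '_' ∈ List.drop (j + 1) s := (List.isPrefixOf_iff_prefix.mp hpre).subset (by simp)
    exact hs (List.mem_of_mem_drop h1)

theorem pv_rfind_none (s : List Char) (hs : '_' ∉ s) : PySem.Chars.rfind s ['_'] = -1 := by
  rw [PySem.Chars.rfind]; exact pv_rfind_go_none s hs _

theorem pv_rfind_go_found (p q : List Char) (hq : '_' ∉ q) :
    ∀ j, p.length ≤ j → PySem.Chars.rfind.go (p ++ '_' :: q) ['_'] j = (p.length : Int) := by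
  intro j
  induction j with
  | zero =>
    intro hj
    have hp : p = [] := List.eq_nil_of_length_eq_zero (Nat.le_zero.mp hj)
    subst hp
    rw [PySem.Chars.rfind.go]
    simp [List.isPrefixOf]
  | succ j ih =>
    intro hj
    rw [PySem.Chars.rfind.go]
    by_cases he : p.length = j + 1
    · rw [← he, List.drop_left]
      rw [if_pos (by simp [List.isPrefixOf])]
    · have hle : p.length ≤ j := by omega
      rw [if_neg, ih hle]
      intro hpre
      have hdrop : List.drop (j + 1) (p ++ '_' :: q) = List.drop (j - p.length) q := by
        rw [List.drop_append]
        rw [List.drop_eq_nil_of_le (by omega), List.nil_append]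
        rw [show j + 1 - p.length = (j - p.length) + 1 by omega]
        simp
      rw [hdrop] at hpre
      have h1 : '_' ∈ List.drop (j - p.length) q := (List.isPrefixOf_iff_prefix.mp hpre).subset (by simp)
      exact hq (List.mem_of_mem_drop h1)

theorem pv_rfind_found (p q : List Char) (hq : '_' ∉ q) :
    PySem.Chars.rfind (p ++ '_' :: q) ['_'] = (p.length : Int) := by
  rw [PySem.Chars.rfind]
  exact pv_rfind_go_found p q hq _ (by simp)

-- pvRun copy lemmas
theorem pvRun_c_copy (cs : List Char) (h : ' ' ∉ cs) : pvRun .c cs = cs := by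
  induction cs with
  | nil => rfl
  | cons c r ih =>
    simp only [List.mem_cons, not_or] at h
    rw [pvRun, if_neg (Ne.symm h.1)]
    simp [ih h.2]

theorem pvRun_q_copy (cs : List Char) (h : ' ' ∉ cs) (hu : '_' ∉ cs) : pvRun .q cs = cs := by
  induction cs with
  | nil => rfl
  | cons c r ih =>
    simp only [List.mem_cons, not_or] at h hu
    rw [pvRun, if_neg (Ne.symm h.1)]
    simp only [if_neg (Ne.symm hu.1)]
    simp [ih h.2 hu.2]

theorem pvRun_q_insert (u v : List Char) (hu : '_' ∉ u) (hus : ' ' ∉ u) (hvs : ' ' ∉ v) :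
    pvRun .q (u ++ '_' :: v) = u ++ '\u200B' :: '_' :: v := by
  induction u with
  | nil =>
    rw [List.nil_append, pvRun, if_neg (by decide)]
    simp [pvRun_c_copy v hvs]
  | cons c r ih =>
    simp only [List.mem_cons, not_or] at hu hus
    rw [List.cons_append, pvRun, if_neg (Ne.symm hus.1)]
    simp only [if_neg (Ne.symm hu.1)]
    simp [ih hu.2 hus.2]

theorem pv_first_underscore (cs : List Char) (h : '_' ∈ cs) : ∃ u v, cs = u ++ '_' :: v ∧ '_' ∉ u := by
  induction cs with
  | nil => simp at h
  | cons c r ih =>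
    by_cases hc : c = '_'
    · exact ⟨[], r, by simp [hc], by simp⟩
    · have hr : '_' ∈ r := by
        rcases List.mem_cons.mp h with h1 | h1
        · exact absurd h1.symm hc
        · exact h1
      obtain ⟨u, v, huv, hu⟩ := ih hr
      exact ⟨c :: u, v, by simp [huv], by simp [hu]; exact fun he => hc he.symm⟩

-- A's token transform equals B's reverse-scan of the token
theorem pvATok_spec (rcs : List Char) (hs : ' ' ∉ rcs) : pvATok rcs.reverse = (pvRun .p rcs).reverse := by
  cases rcs with
  | nil => simp [pvATok, pvRun, PySem.Chars.rfind, PySem.Chars.rfind.go, List.isPrefixOf]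
  | cons c cs =>
    simp at hs
    by_cases hc : c = '_'
    · subst hc
      -- token ends with '_': rfind = len-1, no change; B: mode p sees '_' first → copy
      have hr : PySem.Chars.rfind (cs.reverse ++ ['_']) ['_'] = (cs.reverse.length : Int) :=
        pv_rfind_found cs.reverse [] (by simp) 
      rw [pvRun]
      simp only [List.reverse_cons]
      rw [pvATok]
      simp only [hr]
      rw [if_neg (by simp)]
      simp [pvRun_c_copy cs hs.2]
    · by_cases hmem : '_' ∈ cs
      · obtain ⟨u, v, huv, hu⟩ := pv_first_underscore cs hmem
        subst huv
        simp at hs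
        have hrv : (c :: (u ++ '_' :: v)).reverse = (v.reverse ++ ['_']) ++ (u.reverse ++ [c]) := by
          simp
        have hr : PySem.Chars.rfind ((v.reverse ++ ['_']) ++ (u.reverse ++ [c])) ['_'] = (v.reverse.length : Int) := by
          have : (v.reverse ++ ['_']) ++ (u.reverse ++ [c]) = v.reverse ++ '_' :: (u.reverse ++ [c]) := by simp
          rw [this]
          exact pv_rfind_found v.reverse (u.reverse ++ [c]) (by simp [hu]; exact fun h => hc h.symm)
        rw [hrv, pvATok]
        simp only [hr]
        rw [if_pos (by
          refine ⟨by simp, ?_⟩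
          simp only [List.length_append, List.length_reverse, List.length_cons, List.length_nil]
          push_cast
          omega)]
        rw [show ((v.reverse.length : Int) + 1) = ((v.reverse.length + 1 : Nat) : Int) by push_cast; ring]
        simp only [PySem.Chars.slice_eq_listSlice]
        rw [PySem.List.slice_to _ (Int.natCast_nonneg _), PySem.List.slice_from _ (Int.natCast_nonneg _)]
        simp only [Int.toNat_natCast]
        rw [List.take_left' (by simp), List.drop_left' (by simp)]
        rw [pvRun, if_neg (Ne.symm hs.1)]
        simp only [hc, if_false]
        rw [pvRun_q_insert u v hu hs.2.1 hs.2.2]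
        simp
      · have hnm : '_' ∉ cs.reverse ++ [c] := by
          simp
          exact ⟨hmem, fun he => hc he.symm⟩
        have hr := pv_rfind_none (cs.reverse ++ [c]) hnm
        simp only [List.reverse_cons]
        rw [pvATok]
        simp only [hr]
        rw [if_neg (by simp)]
        rw [pvRun, if_neg (Ne.symm hs.1)]
        simp only [hc, if_false]
        rw [pvRun_q_copy cs hs.2 hmem]
        simp

theorem pvRun_nil (m : PvMode) : pvRun m [] = [] := by cases m <;> rfl

-- a space resets B's scan in every mode
theorem pvRun_space (a : List Char) : ∀ (m : PvMode) (b : List Char),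
    pvRun m (a ++ ' ' :: b) = pvRun m a ++ ' ' :: pvRun .p b := by
  induction a with
  | nil => intro m b; cases m <;> simp [pvRun]
  | cons c r ih =>
    intro m b
    by_cases hc : c = ' '
    · subst hc; simp [pvRun, ih]
    · cases m <;> rw [List.cons_append, pvRun, pvRun] <;> simp only [if_neg hc] <;>
        by_cases hcu : c = '_' <;> simp [hcu, ih]

-- B's scan of a joined token list = join of per-token scans
theorem pvRun_join (ts : List (List Char)) :
    pvRun .p (PySem.Chars.join [' '] ts).reverse =
      (PySem.Chars.join [' '] (ts.map (fun t => (pvRun .p t.reverse).reverse))).reverse := by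
  induction ts with
  | nil => simp [PySem.Chars.join, List.intercalate, pvRun_nil]
  | cons t rest ih =>
    cases rest with
    | nil => simp [PySem.Chars.join, List.intercalate]
    | cons r rs =>
      have hj : PySem.Chars.join [' '] (t :: r :: rs) = t ++ ' ' :: PySem.Chars.join [' '] (r :: rs) := by
        simp [PySem.Chars.join, List.intercalate, List.intersperse]
      have hj2 : PySem.Chars.join [' '] ((t :: r :: rs).map (fun t => (pvRun .p t.reverse).reverse)) =
          (pvRun .p t.reverse).reverse ++ ' ' :: PySem.Chars.join [' '] ((r :: rs).map (fun t => (pvRun .p t.reverse).reverse)) := by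
        simp [PySem.Chars.join, List.intercalate]
      rw [hj, hj2]
      rw [show t ++ ' ' :: PySem.Chars.join [' '] (r :: rs) = (t ++ [' ']) ++ PySem.Chars.join [' '] (r :: rs) by simp]
      rw [List.reverse_append]
      rw [show (t ++ [' ']).reverse = ' ' :: t.reverse by simp]
      rw [show (PySem.Chars.join [' '] (r :: rs)).reverse ++ ' ' :: t.reverse
            = (PySem.Chars.join [' '] (r :: rs)).reverse ++ (' ' :: t.reverse) from rfl]
      rw [pvRun_space, ih]
      simp

-- B's foldl computes pvRun
theorem pvB_fold (l : List Char) : ∀ (acc : List Char) (ne seen : Bool),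
    (List.foldl pvBStep (acc, ne, seen) l).1 = acc ++ pvRun (pvMode ne seen) l := by
  induction l with
  | nil => intro acc ne seen; simp [pvRun]
  | cons ch cs ih =>
    intro acc ne seen
    rw [List.foldl_cons]
    by_cases hsp : ch = ' '
    · subst hsp
      rw [show pvBStep (acc, ne, seen) ' ' = (acc ++ [' '], false, false) by simp [pvBStep]]
      rw [ih]
      cases ne <;> cases seen <;> simp [pvMode, pvRun]
    · by_cases hu : ch = '_'
      · subst hu
        cases seen
        · cases ne
          · rw [show pvBStep (acc, false, false) '_' = (acc ++ ['_'], false, true) by simp [pvBStep]]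
            rw [ih]
            simp [pvMode, pvRun]
          · rw [show pvBStep (acc, true, false) '_' = (acc ++ ['\u200B', '_'], true, true) by simp [pvBStep]]
            rw [ih]
            simp [pvMode, pvRun]
        · rw [show pvBStep (acc, ne, true) '_' = (acc ++ ['_'], ne, true) by simp [pvBStep]]
          rw [ih]
          simp [pvMode, pvRun]
      · rw [show pvBStep (acc, ne, seen) ch = (acc ++ [ch], true, seen) by simp [pvBStep, hsp, hu]]
        rw [ih]
        cases seen <;> cases ne <;> simp [pvMode, pvRun, hsp, hu]

-- ===== VERDICT (by name: the statement is the Claim_ definition above) =====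
theorem add_break_hints_py_spec : Claim_equal_add_break_hints_py := by
  unfold Claim_equal_add_break_hints_py
  intro text _
  unfold Spec_add_break_hints_py
  unfold add_break_hints_py add_break_hints_py_alt
  apply congrArg String.mk
  rw [pvB_fold]
  simp only [List.nil_append]
  rw [show pvMode false false = PvMode.p from rfl]
  rw [pv_splitOn_eq]
  rw [PySem.List.foldl_append_singleton_eq_map]
  conv_rhs => rw [show text.toList = PySem.Chars.join [' '] (pvSplit text.toList) from (pv_join_split _).symm]
  rw [pvRun_join, List.reverse_reverse]
  congr 1
  apply List.map_congr_left
  intro t ht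
  rw [← pvATok_spec t.reverse (by simp; exact pvSplit_no_space _ t ht), List.reverse_reverse]
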